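-- pv_equiv track=rewrite | github.com/cleytonap/code-challenges | Codility/Lesson_10/10_4_Peaks.py | checkPeaks
-- ===== SOURCE A (Python) =====
-- def checkPeaks(A, peaks, k): #constraints: len(peaks) >= 2. Peaks is sorted in ascending order.
--
--
--     if len(A) % k != 0:
--         return False
--
--     if k > len(peaks):
--         return False
--
--     i = 0
--     block_size = len(A) // k
--     while i < len(A):
--
--         for j in range(i, block_size + i):
--             if j in peaks:
--                 break
--         else: #did not hit break!
--             return False #did not find a peak in current block!
--
--         i = i + block_size
--
--     return True
-- ===== SOURCE B (Python) =====
-- def checkPeaks(A, peaks, k):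
--     # bucket each peak into its block instead of scanning each block for a peak
--     if len(A) % k != 0:
--         return False
--     if k > len(peaks):
--         return False
--     if len(A) == 0:
--         return True
--     block_size = len(A) // k
--     covered = {p // block_size for p in peaks if 0 <= p < len(A)}
--     return len(covered) == k
-- ===== Notes on version B (the rewrite author's own statement) =====
-- stated objective: alternative
-- what changed: Instead of scanning every index of every block and testing list membership for each (A), B makes one pass over peaks, buckets each valid peak index into its block via p // block_size, and checks that the number of distinct covered blocks equals k.
import Mathlib
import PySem

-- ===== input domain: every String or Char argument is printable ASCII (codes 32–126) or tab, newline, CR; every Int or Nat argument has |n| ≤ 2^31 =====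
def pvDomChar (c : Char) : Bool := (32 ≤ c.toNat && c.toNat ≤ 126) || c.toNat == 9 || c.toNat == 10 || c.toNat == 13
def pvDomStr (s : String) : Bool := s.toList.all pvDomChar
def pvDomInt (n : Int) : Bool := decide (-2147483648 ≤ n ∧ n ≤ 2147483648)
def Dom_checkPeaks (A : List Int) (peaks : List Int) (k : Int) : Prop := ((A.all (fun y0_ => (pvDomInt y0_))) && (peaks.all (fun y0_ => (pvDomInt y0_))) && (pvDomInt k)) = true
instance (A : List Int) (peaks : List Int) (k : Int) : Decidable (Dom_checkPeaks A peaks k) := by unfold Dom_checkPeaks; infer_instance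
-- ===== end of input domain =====

-- B buckets each valid peak index into its block with one pass over peaks (covered-block count == k)
-- instead of scanning every index of every block; proved equal to A for all k ≠ 0 (k = 0 raises in both).


-- ===== PORT A =====
-- the `for j in range(i, block_size + i): if j in peaks: break / else: return False` body
def pvABlock (peaks : List Int) (i bs : Int) : Bool :=
  (PySem.List.pyRange i (bs + i) 1).any (fun j => peaks.contains j)

-- the `while i < len(A)` loop; fuel only makes the recursion total (len(A)+1 iterations always suffice)
def pvALoop (peaks : List Int) (n bs : Int) : Nat → Int → Bool
  | 0, _ => true
  | fuel + 1, i =>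
    if i < n then
      (if pvABlock peaks i bs then pvALoop peaks n bs fuel (i + bs) else false)
    else true

def checkPeaks (A : List Int) (peaks : List Int) (k : Int) : Bool :=
  if PySem.Int.mod (PySem.List.len A) k ≠ 0 then false
  else if k > PySem.List.len peaks then false
  else pvALoop peaks (PySem.List.len A) (PySem.Int.floordiv (PySem.List.len A) k) (A.length + 1) 0

-- ===== PORT B =====
-- the set comprehension {p // block_size for p in peaks if 0 <= p < len(A)}
def pvCovered (peaks : List Int) (n bs : Int) : PySem.Set Int :=
  PySem.Set.ofList ((peaks.filter (fun p => decide (0 ≤ p ∧ p < n))).map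
    (fun p => PySem.Int.floordiv p bs))

def checkPeaks_alt (A : List Int) (peaks : List Int) (k : Int) : Bool :=
  if PySem.Int.mod (PySem.List.len A) k ≠ 0 then false
  else if k > PySem.List.len peaks then false
  else if PySem.List.len A = 0 then true
  else
    let bs := PySem.Int.floordiv (PySem.List.len A) k
    PySem.Set.len (pvCovered peaks (PySem.List.len A) bs) == k

-- ===== PRECONDITION & SPEC =====
-- Pre_ excludes exactly k = 0, on which Python A raises ZeroDivisionError (len(A) % 0).
def Pre_checkPeaks (A : List Int) (peaks : List Int) (k : Int) : Prop := k ≠ 0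
instance (A : List Int) (peaks : List Int) (k : Int) : Decidable (Pre_checkPeaks A peaks k) := by unfold Pre_checkPeaks; infer_instance
def pvWitness_checkPeaks : List Int × List Int × Int := ([1, 2, 3, 4], [1, 3], 2)

def Spec_checkPeaks (A : List Int) (peaks : List Int) (k : Int) (out : Bool) : Prop := out = checkPeaks_alt A peaks k
instance (A : List Int) (peaks : List Int) (k : Int) (out : Bool) : Decidable (Spec_checkPeaks A peaks k out) := by unfold Spec_checkPeaks; infer_instance

-- ===== CLAIM (what is proved, stated in full; the proofs are below) =====
def Claim_equal_checkPeaks : Prop := ∀ (A : List Int) (peaks : List Int) (k : Int), Dom_checkPeaks A peaks k → Pre_checkPeaks A peaks k → Spec_checkPeaks A peaks k (checkPeaks A peaks k)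

-- ===== LEMMAS AND PROOFS =====

-- A's inner for-else finds a peak in the window [i, i+bs)
theorem pvABlock_iff (peaks : List Int) (i bs : Int) :
    pvABlock peaks i bs = true ↔ ∃ p ∈ peaks, i ≤ p ∧ p < i + bs := by
  simp only [pvABlock, List.any_eq_true, List.contains_iff_mem, PySem.List.mem_pyRange_one]
  constructor
  · rintro ⟨j, ⟨h1, h2⟩, hm⟩; exact ⟨j, hm, h1, by omega⟩
  · rintro ⟨p, hm, h1, h2⟩; exact ⟨p, ⟨h1, by omega⟩, hm⟩

-- A's while loop checks every block at i, i+bs, i+2bs, … below n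
theorem pvALoop_iff (peaks : List Int) (n bs : Int) (hbs : 0 < bs) :
    ∀ (fuel : Nat) (i : Int), n - i ≤ (fuel : Int) * bs →
      (pvALoop peaks n bs fuel i = true ↔
        ∀ j : Int, 0 ≤ j → i + j * bs < n →
          ∃ p ∈ peaks, i + j * bs ≤ p ∧ p < i + j * bs + bs) := by
  intro fuel
  induction fuel with
  | zero =>
    intro i h
    simp only [pvALoop, true_iff]
    intro j hj hlt
    exfalso
    have hjb : 0 ≤ j * bs := mul_nonneg hj hbs.le
    simp only [Nat.cast_zero, zero_mul] at h
    omega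
  | succ fuel ih =>
    intro i h
    by_cases hi : i < n
    · by_cases hb : pvABlock peaks i bs = true
      · have hP := (pvABlock_iff peaks i bs).mp hb
        have hcast : ((fuel + 1 : Nat) : Int) * bs = (fuel : Int) * bs + bs := by
          push_cast; ring
        have hrec : n - (i + bs) ≤ (fuel : Int) * bs := by omega
        have hstep : pvALoop peaks n bs (fuel + 1) i = pvALoop peaks n bs fuel (i + bs) := by
          simp [pvALoop, hi, hb]
        rw [hstep, ih (i + bs) hrec]
        constructor
        · intro hall j hj hlt
          rcases eq_or_lt_of_le hj with hj0 | hjpos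
          · have e : i + j * bs = i := by rw [← hj0]; ring
            rw [e]
            obtain ⟨p, hm, h1, h2⟩ := hP
            exact ⟨p, hm, h1, h2⟩
          · have e : i + bs + (j - 1) * bs = i + j * bs := by ring
            have := hall (j - 1) (by omega) (by rw [e]; exact hlt)
            rw [e] at this
            exact this
        · intro hall j hj hlt
          have e : i + (j + 1) * bs = i + bs + j * bs := by ring
          have := hall (j + 1) (by omega) (by rw [e]; exact hlt)
          rw [e] at this
          exact this
      · have hfalse : pvALoop peaks n bs (fuel + 1) i = false := by
          simp [pvALoop, hi, hb]
        rw [hfalse]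
        simp only [Bool.false_eq_true, false_iff]
        intro hall
        apply hb
        rw [pvABlock_iff]
        have e : i + 0 * bs = i := by ring
        have := hall 0 le_rfl (by rw [e]; exact hi)
        rw [e] at this
        exact this
    · simp only [pvALoop, hi, if_false, true_iff]
      intro j hj hlt
      exfalso
      have hjb : 0 ≤ j * bs := mul_nonneg hj hbs.le
      omega

-- membership in B's bucket set
theorem mem_pvCovered (peaks : List Int) (n bs x : Int) :
    x ∈ pvCovered peaks n bs ↔
      ∃ p ∈ peaks, (0 ≤ p ∧ p < n) ∧ PySem.Int.floordiv p bs = x := by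
  simp only [pvCovered, PySem.Set.mem_ofList, List.mem_map, List.mem_filter,
    decide_eq_true_eq]
  constructor
  · rintro ⟨p, ⟨hm, hr⟩, he⟩; exact ⟨p, hm, hr, he⟩
  · rintro ⟨p, hm, hr, he⟩; exact ⟨p, ⟨hm, hr⟩, he⟩

-- every covered block index lies in [0, k)
theorem pvCovered_range (peaks : List Int) (n bs k x : Int) (hbs : 0 < bs)
    (hn : n = k * bs) (hx : x ∈ pvCovered peaks n bs) : 0 ≤ x ∧ x < k := by
  obtain ⟨p, _, ⟨hp0, hpn⟩, he⟩ := (mem_pvCovered peaks n bs x).mp hx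
  subst he
  constructor
  · rw [PySem.Int.le_floordiv_iff_mul_le hbs]; omega
  · rw [PySem.Int.floordiv_lt_iff_lt_mul hbs]; omega

-- block b is covered iff some peak lies in its window
theorem mem_pvCovered_window (peaks : List Int) (n bs k b : Int) (hbs : 0 < bs)
    (hn : n = k * bs) (hb0 : 0 ≤ b) (hbk : b < k) :
    b ∈ pvCovered peaks n bs ↔ ∃ p ∈ peaks, b * bs ≤ p ∧ p < b * bs + bs := by
  rw [mem_pvCovered]
  constructor
  · rintro ⟨p, hm, ⟨hp0, hpn⟩, he⟩
    have := (PySem.Int.floordiv_eq_iff_of_pos hbs).mp he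
    exact ⟨p, hm, this.1, by nlinarith [this.2]⟩
  · rintro ⟨p, hm, h1, h2⟩
    refine ⟨p, hm, ⟨by nlinarith, by nlinarith⟩, ?_⟩
    rw [PySem.Int.floordiv_eq_iff_of_pos hbs]
    constructor
    · exact h1
    · nlinarith

-- |covered| = k  ↔  every block index below k is covered
theorem pvCovered_len_iff (peaks : List Int) (n bs k : Int) (hbs : 0 < bs)
    (hn : n = k * bs) :
    ((pvCovered peaks n bs).length = k.toNat ↔
      ∀ b : Int, 0 ≤ b → b < k → b ∈ pvCovered peaks n bs) := by
  have hnd : (pvCovered peaks n bs).Nodup := PySem.Set.nodup_ofList _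
  have hRnd : (PySem.List.pyRange 0 k 1).Nodup := PySem.List.nodup_pyRange_one 0 k
  have hRlen : (PySem.List.pyRange 0 k 1).length = k.toNat := by
    rw [PySem.List.length_pyRange_one]; congr 1; omega
  have hsub : (pvCovered peaks n bs).toFinset ⊆ (PySem.List.pyRange 0 k 1).toFinset := by
    intro x hx
    rw [List.mem_toFinset] at hx ⊢
    rw [PySem.List.mem_pyRange_one]
    exact pvCovered_range peaks n bs k x hbs hn hx
  constructor
  · intro hlen b hb0 hbk
    have hcard : (PySem.List.pyRange 0 k 1).toFinset.card ≤ (pvCovered peaks n bs).toFinset.card := by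
      rw [List.toFinset_card_of_nodup hnd, List.toFinset_card_of_nodup hRnd, hlen, hRlen]
    have heq := Finset.eq_of_subset_of_card_le hsub hcard
    have : b ∈ (PySem.List.pyRange 0 k 1).toFinset := by
      rw [List.mem_toFinset, PySem.List.mem_pyRange_one]; exact ⟨hb0, hbk⟩
    rw [← heq, List.mem_toFinset] at this
    exact this
  · intro hall
    have hsup : (PySem.List.pyRange 0 k 1).toFinset ⊆ (pvCovered peaks n bs).toFinset := by
      intro x hx
      rw [List.mem_toFinset] at hx ⊢
      rw [PySem.List.mem_pyRange_one] at hx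
      exact hall x hx.1 hx.2
    have heq := Finset.Subset.antisymm hsub hsup
    have := congrArg Finset.card heq
    rw [List.toFinset_card_of_nodup hnd, List.toFinset_card_of_nodup hRnd, hRlen] at this
    exact this

-- ===== VERDICT (by name: the statement is the Claim_ definition above) =====
theorem checkPeaks_spec : Claim_equal_checkPeaks := by
  intro A peaks k _ hpre
  unfold Spec_checkPeaks checkPeaks checkPeaks_alt
  simp only [PySem.List.len_eq]
  by_cases h1 : PySem.Int.mod ((A.length : Int)) k = 0
  · have h1' : ¬ PySem.Int.mod ((A.length : Int)) k ≠ 0 := not_not_intro h1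
    rw [if_neg h1', if_neg h1']
    by_cases h2 : k > ((peaks.length : Int))
    · rw [if_pos h2, if_pos h2]
    · rw [if_neg h2, if_neg h2]
      by_cases h3 : A.length = 0
      · have hz : ((A.length : Int)) = 0 := by simp [h3]
        rw [if_pos hz]
        simp [h3, pvALoop]
      · have hNpos : (0 : Int) < (A.length : Int) := by exact_mod_cast Nat.pos_of_ne_zero h3
        have hNz : ((A.length : Int)) ≠ 0 := by omega
        rw [if_neg hNz]
        set bs := PySem.Int.floordiv ((A.length : Int)) k with hbsdef
        have hid : bs * k = ((A.length : Int)) := by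
          have h := PySem.Int.floordiv_mul_add_mod ((A.length : Int)) k
          rw [← hbsdef, h1, add_zero] at h
          exact h
        show pvALoop peaks ((A.length : Int)) bs (A.length + 1) 0 =
          (PySem.Set.len (pvCovered peaks ((A.length : Int)) bs) == k)
        have hslen : PySem.Set.len (pvCovered peaks ((A.length : Int)) bs) =
            (((pvCovered peaks ((A.length : Int)) bs).length : Int)) := by
          simp [PySem.Set.len]
        rw [hslen]
        have hn : ((A.length : Int)) = k * bs := by rw [← hid, mul_comm]
        rcases lt_trichotomy k 0 with hkneg | hk0 | hkpos
        · -- k < 0: A's first block range is empty, so A returns False; B's count is ≥ 0 > k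
          have hbsneg : bs < 0 := by nlinarith
          have hnil : PySem.List.pyRange 0 (bs + 0) 1 = [] :=
            PySem.List.pyRange_one_eq_nil (by omega)
          have hblock : pvABlock peaks 0 bs = false := by rw [pvABlock, hnil]; rfl
          have hA : pvALoop peaks ((A.length : Int)) bs (A.length + 1) 0 = false := by
            simp [pvALoop, hblock]
            omega
          rw [hA]
          have hC : (0 : Int) ≤ (((pvCovered peaks ((A.length : Int)) bs).length : Int)) := by
            positivity
          symm
          rw [beq_eq_false_iff_ne]
          omega
        · exact absurd hk0 hpre
        · -- k > 0: the main case
          have hbspos : 0 < bs := by nlinarith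
          have hfuel : ((A.length : Int)) - 0 ≤ (((A.length + 1 : Nat)) : Int) * bs := by
            have hc : (((A.length + 1 : Nat)) : Int) = ((A.length : Int)) + 1 := by push_cast; ring
            rw [hc]
            nlinarith
          rw [Bool.eq_iff_iff,
            pvALoop_iff peaks ((A.length : Int)) bs hbspos (A.length + 1) 0 hfuel, beq_iff_eq]
          have hlen_iff : ((((pvCovered peaks ((A.length : Int)) bs).length : Int)) = k ↔
              (pvCovered peaks ((A.length : Int)) bs).length = k.toNat) := by omega
          rw [hlen_iff,
            pvCovered_len_iff peaks ((A.length : Int)) bs k hbspos hn]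
          constructor
          · intro hall b hb0 hbk
            rw [mem_pvCovered_window peaks ((A.length : Int)) bs k b hbspos hn hb0 hbk]
            have e : (0 : Int) + b * bs = b * bs := by ring
            have hlt : (0 : Int) + b * bs < ((A.length : Int)) := by
              rw [e]; nlinarith
            have := hall b hb0 hlt
            rw [e] at this
            exact this
          · intro hall j hj hlt
            have e : (0 : Int) + j * bs = j * bs := by ring
            rw [e] at hlt ⊢
            have hjk : j < k := by nlinarith
            have := hall j hj hjk
            rw [mem_pvCovered_window peaks ((A.length : Int)) bs k j hbspos hn hj hjk] at this
            exact this
  · rw [if_pos h1, if_pos h1]
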